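-- pv_equiv track=rewrite | github.com/pranftw/ai-lab | eight_puzzle.py | validate_game_input
-- ===== SOURCE A (Python) =====
-- def validate_game_input(game_arr_inp):
--     if(len(game_arr_inp)!=9):
--         return False
--     elif(len(set(game_arr_inp))!=len(game_arr_inp)):
--         return False
--     else:
--         for inp in game_arr_inp:
--             if(not((inp in range(1,9)) or (inp==-1))):
--                 return False
--     return True
-- ===== SOURCE B (Python) =====
-- def validate_game_input(game_arr_inp):
--     return len(game_arr_inp) == 9 and set(game_arr_inp) == {-1, 1, 2, 3, 4, 5, 6, 7, 8}
-- ===== Notes on version B (the rewrite author's own statement) =====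
-- stated objective: simpler
-- what changed: Replaces A's per-element membership loop plus separate uniqueness check with a single whole-set equality of set(input) against the literal target set, guarded by the length test.
import Mathlib
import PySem

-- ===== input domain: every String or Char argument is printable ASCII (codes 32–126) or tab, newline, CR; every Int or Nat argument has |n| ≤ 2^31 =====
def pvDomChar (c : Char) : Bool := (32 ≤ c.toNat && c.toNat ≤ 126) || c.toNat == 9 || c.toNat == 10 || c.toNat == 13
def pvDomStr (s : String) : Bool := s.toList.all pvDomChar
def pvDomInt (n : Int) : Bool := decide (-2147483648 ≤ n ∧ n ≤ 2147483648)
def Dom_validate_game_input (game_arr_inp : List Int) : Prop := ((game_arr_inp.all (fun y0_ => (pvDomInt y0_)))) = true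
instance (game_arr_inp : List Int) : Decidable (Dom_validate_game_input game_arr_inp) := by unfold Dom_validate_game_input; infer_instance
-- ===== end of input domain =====

-- B replaces A's per-element membership loop and separate uniqueness check with one
-- whole-set equality of set(input) against the literal target set (objective: simpler).


-- ===== PORT A =====
-- the for-loop with its early 'return False': structural recursion over the list
def validate_game_input_loop (xs : List Int) : Bool :=
  match xs with
  | [] => true
  | inp :: rest =>
      if !((PySem.List.pyRange 1 9 1).contains inp || inp == -1) then false
      else validate_game_input_loop rest

def validate_game_input (game_arr_inp : List Int) : Bool :=
  if game_arr_inp.length ≠ 9 then false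
  else if (PySem.Set.ofList game_arr_inp).length ≠ game_arr_inp.length then false
  else validate_game_input_loop game_arr_inp

-- ===== PORT B =====
def validate_game_input_alt (game_arr_inp : List Int) : Bool :=
  decide (game_arr_inp.length = 9) &&
    PySem.Set.equal (PySem.Set.ofList game_arr_inp)
      (PySem.Set.ofList [-1, 1, 2, 3, 4, 5, 6, 7, 8])

-- ===== PRECONDITION & SPEC =====
def Spec_validate_game_input (game_arr_inp : List Int) (out : Bool) : Prop := out = validate_game_input_alt game_arr_inp
instance (game_arr_inp : List Int) (out : Bool) : Decidable (Spec_validate_game_input game_arr_inp out) := by unfold Spec_validate_game_input; infer_instance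

-- ===== CLAIM (what is proved, stated in full; the proofs are below) =====
def Claim_equal_validate_game_input : Prop := ∀ (game_arr_inp : List Int), Dom_validate_game_input game_arr_inp → Spec_validate_game_input game_arr_inp (validate_game_input game_arr_inp)

-- ===== LEMMAS AND PROOFS =====

-- the allowed values: range(1,9) plus -1, in B's literal order
def pvTarget : List Int := [-1, 1, 2, 3, 4, 5, 6, 7, 8]

lemma pvTarget_nodup : pvTarget.Nodup := by decide

-- A's per-element test is membership in pvTarget
lemma elem_test (a : Int) :
    ((PySem.List.pyRange 1 9 1).contains a || a == -1) = decide (a ∈ pvTarget) := by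
  by_cases h : a ∈ pvTarget
  · have h' : a ∈ PySem.List.pyRange 1 9 1 ∨ a = -1 := by
      rw [PySem.List.mem_pyRange_one]
      simp only [pvTarget, List.mem_cons, List.not_mem_nil, or_false] at h
      omega
    rcases h' with h' | h' <;> simp [h', pvTarget] <;> simpa [pvTarget] using h
  · have h1 : a ∉ PySem.List.pyRange 1 9 1 := by
      rw [PySem.List.mem_pyRange_one]
      simp only [pvTarget, List.mem_cons, List.not_mem_nil, or_false] at h
      omega
    have h2 : a ≠ -1 := by
      intro hn; exact h (by simp [pvTarget, hn])
    simp [h, h1, h2]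

lemma loop_iff_forall (xs : List Int) :
    validate_game_input_loop xs = true ↔ ∀ x ∈ xs, x ∈ pvTarget := by
  induction xs with
  | nil => simp [validate_game_input_loop]
  | cons a t ih =>
      simp only [validate_game_input_loop, elem_test, List.mem_cons]
      by_cases h : a ∈ pvTarget <;> simp [h, ih]

theorem validate_game_input_spec : Claim_equal_validate_game_input := by
  intro xs _
  unfold Spec_validate_game_input validate_game_input validate_game_input_alt
  have htgt : PySem.Set.ofList pvTarget = pvTarget :=
    PySem.Set.ofList_eq_self_of_nodup pvTarget pvTarget_nodup
  rw [show (PySem.Set.ofList [-1, 1, 2, 3, 4, 5, 6, 7, 8] : List Int)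
        = pvTarget from htgt]
  by_cases hlen : xs.length = 9
  · rw [if_neg (by omega : ¬ xs.length ≠ 9)]
    set s := PySem.Set.ofList xs with hs
    have hsnodup : s.Nodup := PySem.Set.nodup_ofList xs
    have hmem : ∀ x, x ∈ s ↔ x ∈ xs := fun x => PySem.Set.mem_ofList xs x
    by_cases hnd : s.length = xs.length
    · rw [if_neg (by omega : ¬ s.length ≠ xs.length)]
      by_cases hall : ∀ x ∈ xs, x ∈ pvTarget
      · -- both sides true: s is a nodup 9-element subset of the 9-element target
        have hsp : List.Subperm s pvTarget :=
          hsnodup.subperm (fun x hx => hall x ((hmem x).mp hx))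
        have hperm : s.Perm pvTarget :=
          hsp.perm_of_length_le (by simp [pvTarget]; omega)
        have heq : PySem.Set.equal s pvTarget = true := by
          rw [PySem.Set.equal_iff]; exact fun x => hperm.mem_iff
        rw [(loop_iff_forall xs).mpr hall, heq, hlen]
        simp
      · -- both sides false: some element outside the target set
        have hloop : validate_game_input_loop xs = false := by
          rcases Bool.eq_false_or_eq_true (validate_game_input_loop xs) with h | h
          · exact absurd ((loop_iff_forall xs).mp h) hall
          · exact h
        rw [hloop]
        symm; rw [Bool.and_eq_false_iff]
        right; rw [Bool.eq_false_iff]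
        intro heq
        rw [PySem.Set.equal_iff] at heq
        exact hall (fun x hx => (heq x).mp ((hmem x).mpr hx))
    · -- duplicates: A returns false; B's set is too short to equal the 9-element target
      rw [if_pos hnd]
      symm; rw [Bool.and_eq_false_iff]
      right; rw [Bool.eq_false_iff]
      intro heq
      rw [PySem.Set.equal_iff] at heq
      have hperm : s.Perm pvTarget :=
        (List.perm_ext_iff_of_nodup hsnodup pvTarget_nodup).mpr heq
      have := hperm.length_eq
      simp [pvTarget] at this
      omega
  · rw [if_pos hlen]
    simp [hlen]
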